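-- pv_equiv track=rewrite | github.com/joyshmitz/franken_node | scripts/check_adjacent_substrate_policy.py | tier_counts
-- ===== SOURCE A (Python) =====
-- TIER_KEYS = ("mandatory_modules", "should_use_modules", "optional_modules")
--
-- def tier_counts(assignments: dict[str, dict[str, dict[str, str]]]) -> dict[str, dict[str, int]]:
--     counts: dict[str, dict[str, int]] = {}
--     for substrate, mapping in assignments.items():
--         substrate_counts = {tier: 0 for tier in TIER_KEYS}
--         for record in mapping.values():
--             tier_name = record.get("tier")
--             if tier_name in substrate_counts:
--                 substrate_counts[tier_name] += 1
--         counts[substrate] = substrate_counts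
--     return counts
-- ===== SOURCE B (Python) =====
-- TIER_KEYS = ("mandatory_modules", "should_use_modules", "optional_modules")
--
-- def tier_counts(assignments: dict[str, dict[str, dict[str, str]]]) -> dict[str, dict[str, int]]:
--     return {
--         substrate: {
--             tier: sum(1 for record in mapping.values() if record.get("tier") == tier)
--             for tier in TIER_KEYS
--         }
--         for substrate, mapping in assignments.items()
--     }
-- ===== Notes on version B (the rewrite author's own statement) =====
-- stated objective: simpler
-- what changed: Replaces the single-pass dict-increment with membership guard by a nested comprehension that, for each substrate and each of the three fixed tiers, counts matching records directly; no mutable counter dict is built.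
import Mathlib
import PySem

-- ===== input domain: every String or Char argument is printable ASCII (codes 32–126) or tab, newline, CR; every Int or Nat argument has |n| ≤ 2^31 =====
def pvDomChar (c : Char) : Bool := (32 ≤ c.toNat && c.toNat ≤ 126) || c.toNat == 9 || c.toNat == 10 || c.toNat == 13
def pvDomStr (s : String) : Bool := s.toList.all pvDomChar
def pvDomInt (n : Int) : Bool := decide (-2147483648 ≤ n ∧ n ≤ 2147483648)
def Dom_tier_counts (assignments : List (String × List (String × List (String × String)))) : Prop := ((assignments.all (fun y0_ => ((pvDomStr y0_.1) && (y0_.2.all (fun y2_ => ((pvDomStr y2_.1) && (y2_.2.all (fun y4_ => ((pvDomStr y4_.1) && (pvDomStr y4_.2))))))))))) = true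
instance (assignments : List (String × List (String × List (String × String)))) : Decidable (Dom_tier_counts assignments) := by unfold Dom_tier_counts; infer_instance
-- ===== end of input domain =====

-- B replaces A's single-pass mutable counter dict by a per-tier counting comprehension (objective: simpler).

-- ===== PORT A =====
-- substrate_counts = {tier: 0 for tier in TIER_KEYS}
def tcInit : PySem.Dict String Int :=
  ["mandatory_modules", "should_use_modules", "optional_modules"].foldl
    (fun d tier => d.insert tier 0) PySem.Dict.empty

-- the body of A's inner loop: tier_name = record.get("tier"); if tier_name in substrate_counts: ... += 1
def tcStep (sc : PySem.Dict String Int) (rp : String × List (String × String)) : PySem.Dict String Int :=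
  match (PySem.Dict.mk rp.2).get? "tier" with
  | some tier_name => if sc.contains tier_name then sc.insert tier_name (sc.getD tier_name 0 + 1) else sc
  | none => sc

def tier_counts (assignments : List (String × List (String × List (String × String)))) : List (String × List (String × Int)) :=
  (assignments.foldl
     (fun counts p => counts.insert p.1 ((p.2.foldl tcStep tcInit).items))
     PySem.Dict.empty).items

-- ===== PORT B =====
-- sum(1 for record in mapping.values() if record.get("tier") == tier)
def tcCount (mapping : List (String × List (String × String))) (tier : String) : Int :=
  (mapping.countP (fun rp => (PySem.Dict.mk rp.2).get? "tier" == some tier) : Int)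

def tier_counts_alt (assignments : List (String × List (String × List (String × String)))) : List (String × List (String × Int)) :=
  assignments.map (fun sp =>
    (sp.1, ["mandatory_modules", "should_use_modules", "optional_modules"].map
             (fun tier => (tier, tcCount sp.2 tier))))

-- ===== PRECONDITION & SPEC =====
-- Pre_ excludes association lists whose outer (substrate) keys repeat: such lists do not encode any
-- Python dict input (dict keys are unique), so A's dict-overwrite behaviour there is accidental.
def Pre_tier_counts (assignments : List (String × List (String × List (String × String)))) : Prop :=
  (assignments.map Prod.fst).Nodup
instance (assignments : List (String × List (String × List (String × String)))) : Decidable (Pre_tier_counts assignments) := by unfold Pre_tier_counts; infer_instance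

def pvWitness_tier_counts : (List (String × List (String × List (String × String)))) :=
  [("s1", [("r1", [("tier", "mandatory_modules")]), ("r2", [("tier", "other")])]),
   ("s2", [])]

def Spec_tier_counts (assignments : List (String × List (String × List (String × String)))) (out : List (String × List (String × Int))) : Prop := out = tier_counts_alt assignments
instance (assignments : List (String × List (String × List (String × String)))) (out : List (String × List (String × Int))) : Decidable (Spec_tier_counts assignments out) := by unfold Spec_tier_counts; infer_instance

-- ===== CLAIM (what is proved, stated in full; the proofs are below) =====
def Claim_equal_tier_counts : Prop := ∀ (assignments : List (String × List (String × List (String × String)))), Dom_tier_counts assignments → Pre_tier_counts assignments → Spec_tier_counts assignments (tier_counts assignments)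

-- ===== LEMMAS AND PROOFS =====

lemma tcInit_eq : tcInit = PySem.Dict.mk
    [("mandatory_modules", (0:Int)), ("should_use_modules", 0), ("optional_modules", 0)] := by
  decide

-- A's inner fold over a mapping, started at any three counter values, adds the per-tier counts.
lemma tc_fold_inner (m : List (String × List (String × String))) (a b c : Int) :
    m.foldl tcStep (PySem.Dict.mk
      [("mandatory_modules", a), ("should_use_modules", b), ("optional_modules", c)]) =
    PySem.Dict.mk
      [("mandatory_modules", a + tcCount m "mandatory_modules"),
       ("should_use_modules", b + tcCount m "should_use_modules"),
       ("optional_modules", c + tcCount m "optional_modules")] := by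
  induction m generalizing a b c with
  | nil => simp [tcCount]
  | cons hd tl ih =>
    simp only [List.foldl_cons]
    cases h : (PySem.Dict.mk hd.2).get? "tier" with
    | none =>
      have hs : tcStep (PySem.Dict.mk [("mandatory_modules", a), ("should_use_modules", b), ("optional_modules", c)]) hd = PySem.Dict.mk [("mandatory_modules", a), ("should_use_modules", b), ("optional_modules", c)] := by
        simp [tcStep, h]
      rw [hs, ih]
      simp [tcCount, h]
    | some t =>
      by_cases h1 : t = "mandatory_modules"
      · subst h1
        have hs : tcStep (PySem.Dict.mk [("mandatory_modules", a), ("should_use_modules", b), ("optional_modules", c)]) hd = PySem.Dict.mk [("mandatory_modules", a + 1), ("should_use_modules", b), ("optional_modules", c)] := by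
          simp only [tcStep, h]
          rw [if_pos (by simp [PySem.Dict.contains_mk])]
          apply PySem.Dict.ext
          rw [PySem.Dict.items_insert]
          simp [PySem.Dict.getD_eq_get?_getD, PySem.Dict.get?_mk_cons]
        rw [hs, ih]
        simp [tcCount, h]
        ring
      · by_cases h2 : t = "should_use_modules"
        · subst h2
          have hs : tcStep (PySem.Dict.mk [("mandatory_modules", a), ("should_use_modules", b), ("optional_modules", c)]) hd = PySem.Dict.mk [("mandatory_modules", a), ("should_use_modules", b + 1), ("optional_modules", c)] := by
            simp only [tcStep, h]
            rw [if_pos (by simp [PySem.Dict.contains_mk])]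
            apply PySem.Dict.ext
            rw [PySem.Dict.items_insert]
            simp [PySem.Dict.getD_eq_get?_getD, PySem.Dict.get?_mk_cons]
          rw [hs, ih]
          simp [tcCount, h]
          ring
        · by_cases h3 : t = "optional_modules"
          · subst h3
            have hs : tcStep (PySem.Dict.mk [("mandatory_modules", a), ("should_use_modules", b), ("optional_modules", c)]) hd = PySem.Dict.mk [("mandatory_modules", a), ("should_use_modules", b), ("optional_modules", c + 1)] := by
              simp only [tcStep, h]
              rw [if_pos (by simp [PySem.Dict.contains_mk])]
              apply PySem.Dict.ext
              rw [PySem.Dict.items_insert]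
              simp [PySem.Dict.getD_eq_get?_getD, PySem.Dict.get?_mk_cons]
            rw [hs, ih]
            simp [tcCount, h]
            ring
          · have hs : tcStep (PySem.Dict.mk [("mandatory_modules", a), ("should_use_modules", b), ("optional_modules", c)]) hd = PySem.Dict.mk [("mandatory_modules", a), ("should_use_modules", b), ("optional_modules", c)] := by
              simp only [tcStep, h]
              rw [if_neg]
              simp [PySem.Dict.contains_mk, h1, h2, h3, Ne.symm]
            rw [hs, ih]
            simp [tcCount, h, h1, h2, h3]

theorem tier_counts_spec : Claim_equal_tier_counts := by
  intro assignments _ hpre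
  unfold Spec_tier_counts tier_counts tier_counts_alt
  have hnd : (assignments.map Prod.fst).Nodup := hpre
  rw [PySem.Dict.items_foldl_insert_fresh assignments Prod.fst
        (fun p => ((p.2.foldl tcStep tcInit).items)) PySem.Dict.empty
        (fun a _ => PySem.Dict.contains_empty _) hnd]
  simp only [PySem.Dict.empty, List.nil_append]
  apply List.map_congr_left
  intro p _
  rw [tcInit_eq, tc_fold_inner]
  simp
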